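-- pv_equiv track=rewrite | github.com/songkg7/1day-1algorithm | programmers/kakao/python/괄호 변환_test.py | recurse
-- ===== SOURCE A (Python) =====
-- from collections import deque
--
-- def detach(string):
--     str_que = deque(string)  # queue 활용
--     u, v = '', ''
--     left = 0
--     right = 0
--     while str_que:
--         u += str_que.popleft()
--         if u[-1] == '(':
--             left += 1
--         else:
--             right += 1
--         if left == right:
--             break
--
--     v = ''.join(list(str_que))
--     return u, v
--
-- def is_correct(string):
--     stack = []
--     for s in string:
--         if s == '(':
--             stack.append(s)
--         elif stack:
--             stack.pop()
--     return not stack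
--
-- def reverse(string):
--     return ''.join([')' if s == '(' else '(' for s in string])
--
-- def recurse(string):
--     if string == '':  # 1단계
--         return ''
--
--     u, v = detach(string)  # 2단계
--     if is_correct(u):  # 3단계
--         return u + recurse(v)
--     else:  # 4단계
--         return '(' + recurse(v) + ')' + reverse(u[1:-1])
-- ===== SOURCE B (Python) =====
-- def recurse(string):
--     # Iterative one-pass rewrite: index scan with balance + floored-depth counters
--     # and an explicit LIFO of pending tails, instead of recursion on rebuilt strings.
--     n = len(string)
--     out = []
--     tails = []
--     i = 0
--     while i < n:
--         bal = 0
--         cnt = 0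
--         j = i
--         while True:
--             if string[j] == '(':
--                 bal += 1
--                 cnt += 1
--             else:
--                 bal -= 1
--                 if cnt:
--                     cnt -= 1
--             j += 1
--             if bal == 0 or j == n:
--                 break
--         if cnt == 0:
--             out.append(string[i:j])
--         else:
--             out.append('(')
--             tails.append(')' + ''.join(')' if c == '(' else '(' for c in string[i + 1:j - 1]))
--         i = j
--     while tails:
--         out.append(tails.pop())
--     return ''.join(out)
-- ===== Notes on version B (the rewrite author's own statement) =====
-- stated objective: faster
-- what changed: Replaced A's recursion over re-built strings (deque detach + separate stack-based is_correct + repeated string concatenation per level) by a single iterative index scan that fuses segment splitting and correctness checking into one pass with a balance counter and a floored depth counter, collecting output pieces and pending close-paren+flipped-middle tail strings on an explicit LIFO stack drained at the end.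
import Mathlib
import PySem

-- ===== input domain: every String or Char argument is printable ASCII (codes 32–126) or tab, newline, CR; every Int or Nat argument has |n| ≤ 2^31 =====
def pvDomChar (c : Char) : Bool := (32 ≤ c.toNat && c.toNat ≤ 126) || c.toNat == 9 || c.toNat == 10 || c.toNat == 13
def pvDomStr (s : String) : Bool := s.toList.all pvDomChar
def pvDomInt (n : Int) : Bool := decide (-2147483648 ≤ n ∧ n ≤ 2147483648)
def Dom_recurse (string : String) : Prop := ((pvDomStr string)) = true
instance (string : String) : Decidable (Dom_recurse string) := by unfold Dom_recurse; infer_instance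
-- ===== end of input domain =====

-- B replaces A's recursion over rebuilt strings by a single iterative scan with
-- balance/depth counters and an explicit LIFO of pending tails (measured asymptotically faster).

-- ===== PORT A =====
-- helper `reverse` of A: ''.join([')' if s == '(' else '(' for s in string])
def pyFlipA (s : List Char) : List Char := s.map (fun c => if c = '(' then ')' else '(')

-- helper `detach` of A: pop chars from the front, counting left/right, stop when equal
def detachAux : List Char → List Char → Int → Int → List Char × List Char
  | [], u, _, _ => (u, [])
  | c :: rest, u, left, right =>
      let u' := u ++ [c]
      let left' := if c = '(' then left + 1 else left
      let right' := if c = '(' then right else right + 1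
      if left' = right' then (u', rest) else detachAux rest u' left' right'

def detachA (s : List Char) : List Char × List Char := detachAux s [] 0 0

-- helper `is_correct` of A: a real stack of '(' characters
def isCorrectStep (stack : List Char) (c : Char) : List Char :=
  if c = '(' then stack ++ [c] else if stack = [] then stack else stack.dropLast

def isCorrectA (s : List Char) : Bool := (s.foldl isCorrectStep []) == []

theorem detachAux_snd_lt : ∀ (s u : List Char) (l r : Int), s ≠ [] →
    ((detachAux s u l r).2).length < s.length := by
  intro s
  induction s with
  | nil => intro _ _ _ h; exact absurd rfl h
  | cons c rest ih =>
      intro u l r _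
      simp only [detachAux]
      by_cases hb : (if c = '(' then l + 1 else l) = (if c = '(' then r else r + 1)
      · rw [if_pos hb]; simp
      · rw [if_neg hb]
        cases hr : rest with
        | nil => subst hr; simp [detachAux]
        | cons d t => subst hr; exact Nat.lt_succ_of_lt (ih _ _ _ (by simp))

def recurseL (s : List Char) : List Char :=
  if h : s = [] then []
  else
    let u := (detachA s).1
    let v := (detachA s).2
    if isCorrectA u then u ++ recurseL v
    else '(' :: recurseL v ++ [')'] ++ pyFlipA (PySem.List.slice u (some 1) (some (-1)))
termination_by s.length
decreasing_by
  all_goals exact detachAux_snd_lt s [] 0 0 h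

def recurse (string : String) : String := String.ofList (recurseL string.toList)

-- ===== PORT B =====
-- helper for B's inline generator ')' if c == '(' else '('
def flipB : List Char → List Char
  | [] => []
  | c :: t => (if c = '(' then ')' else '(') :: flipB t

-- B's inner `while True` scan over the remaining suffix (index j → suffix list):
-- returns (u, rest, cnt) = (consumed segment, remainder, floored depth counter)
def scanB : List Char → Int → Nat → List Char → List Char × List Char × Nat
  | [], _, cnt, u => (u, [], cnt)
  | c :: rest, bal, cnt, u =>
      let bal' := if c = '(' then bal + 1 else bal - 1
      let cnt' := if c = '(' then cnt + 1 else cnt - 1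
      if bal' = 0 ∨ rest = [] then (u ++ [c], rest, cnt') else scanB rest bal' cnt' (u ++ [c])

theorem scanB_snd_lt : ∀ (s : List Char) (bal : Int) (cnt : Nat) (u : List Char), s ≠ [] →
    ((scanB s bal cnt u).2.1).length < s.length := by
  intro s
  induction s with
  | nil => intro _ _ _ h; exact absurd rfl h
  | cons c rest ih =>
      intro bal cnt u _
      simp only [scanB]
      by_cases hb : (if c = '(' then bal + 1 else bal - 1) = 0 ∨ rest = []
      · rw [if_pos hb]; simp
      · rw [if_neg hb]
        have hrest : rest ≠ [] := fun hr => hb (Or.inr hr)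
        exact Nat.lt_succ_of_lt (ih _ _ _ hrest)

-- B's outer `while i < n` loop; `tails` is the pending-suffix stack (front = last pushed),
-- drained at the end (the final pop loop of Source B = flatten).
def loopB (s : List Char) (out : List Char) (tails : List (List Char)) : List Char :=
  if h : s = [] then out ++ tails.flatten
  else
    let r := scanB s 0 0 []
    if r.2.2 = 0 then loopB r.2.1 (out ++ r.1) tails
    else loopB r.2.1 (out ++ ['(']) ((')' :: flipB ((r.1.drop 1).dropLast)) :: tails)
termination_by s.length
decreasing_by
  all_goals exact scanB_snd_lt s 0 0 [] h

def recurse_alt (string : String) : String := String.ofList (loopB string.toList [] [])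

-- ===== PRECONDITION & SPEC =====
def Spec_recurse (string : String) (out : String) : Prop := out = recurse_alt string
instance (string : String) (out : String) : Decidable (Spec_recurse string out) := by unfold Spec_recurse; infer_instance

-- ===== CLAIM (what is proved, stated in full; the proofs are below) =====
def Claim_equal_recurse : Prop := ∀ (string : String), Dom_recurse string → Spec_recurse string (recurse string)

-- ===== LEMMAS AND PROOFS =====

theorem slice_one_neg_one (u : List Char) :
    PySem.List.slice u (some 1) (some (-1)) = (u.drop 1).dropLast := by
  cases u with
  | nil => rfl
  | cons a t =>
      unfold PySem.List.slice
      simp [List.dropLast_eq_take]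

theorem flipB_eq_map (s : List Char) : flipB s = pyFlipA s := by
  induction s with
  | nil => rfl
  | cons c t ih => simp [flipB, pyFlipA, ih]

theorem isCorrectStep_len (st : List Char) (c : Char) :
    (isCorrectStep st c).length = if c = '(' then st.length + 1 else st.length - 1 := by
  unfold isCorrectStep
  split_ifs with h1 h2 <;> simp_all

-- the fused scan of B computes exactly A's detach plus the length of A's is_correct stack
theorem scan_eq_detach : ∀ (s u : List Char) (l r : Int),
    scanB s (l - r) (u.foldl isCorrectStep []).length u
      = ((detachAux s u l r).1, (detachAux s u l r).2,
          ((detachAux s u l r).1.foldl isCorrectStep []).length) := by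
  intro s
  induction s with
  | nil => intro u l r; simp [scanB, detachAux]
  | cons c rest ih =>
      intro u l r
      by_cases hc : c = '('
      · subst hc
        have hfold' : ((u ++ ['(']).foldl isCorrectStep []).length
            = (u.foldl isCorrectStep []).length + 1 := by
          rw [List.foldl_append, List.foldl_cons, List.foldl_nil, isCorrectStep_len]
          simp
        simp only [scanB, detachAux, reduceIte]
        by_cases hb : l - r + 1 = 0
        · have hlr : l + 1 = r := by omega
          simp [hb, hlr, isCorrectStep_len]
        · have hlr : ¬ (l + 1 = r) := by omega
          by_cases hr : rest = []
          · subst hr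
            simp [hb, hlr, detachAux, isCorrectStep_len]
          · have hstep := ih (u ++ ['(']) (l + 1) r
            rw [show l + 1 - r = l - r + 1 by ring, hfold'] at hstep
            rw [if_neg (by simp [hb, hr] : ¬ (l - r + 1 = 0 ∨ rest = [])), if_neg hlr]
            exact hstep
      · have hfold' : ((u ++ [c]).foldl isCorrectStep []).length
            = (u.foldl isCorrectStep []).length - 1 := by
          rw [List.foldl_append, List.foldl_cons, List.foldl_nil, isCorrectStep_len]
          simp [hc]
        simp only [scanB, detachAux, if_neg hc]
        by_cases hb : l - r - 1 = 0
        · have hlr : l = r + 1 := by omega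
          simp [hlr, isCorrectStep_len, hc]
        · have hlr : ¬ (l = r + 1) := by omega
          by_cases hr : rest = []
          · subst hr
            simp [hb, hlr, detachAux, isCorrectStep_len, hc]
          · have hstep := ih (u ++ [c]) l (r + 1)
            rw [show l - (r + 1) = l - r - 1 by ring, hfold'] at hstep
            rw [if_neg (by simp [hb, hr] : ¬ (l - r - 1 = 0 ∨ rest = [])), if_neg hlr]
            exact hstep

theorem loopB_eq : ∀ (n : Nat) (s : List Char), s.length ≤ n →
    ∀ (out : List Char) (tails : List (List Char)),
    loopB s out tails = out ++ recurseL s ++ tails.flatten := by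
  intro n
  induction n with
  | zero =>
      intro s hs out tails
      have : s = [] := List.eq_nil_of_length_eq_zero (Nat.le_zero.mp hs)
      subst this
      simp [loopB, recurseL]
  | succ n ih =>
      intro s hs out tails
      by_cases h : s = []
      · subst h; simp [loopB, recurseL]
      · have hscan := scan_eq_detach s [] 0 0
        rw [show (0 : Int) - 0 = 0 by ring] at hscan
        simp only [List.foldl_nil, List.length_nil] at hscan
        have hvlen : (detachAux s [] 0 0).2.length ≤ n := by
          have := detachAux_snd_lt s [] 0 0 h
          omega
        rw [loopB, recurseL]
        simp only [h, dif_neg, not_false_iff]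
        rw [hscan]
        have hcorr : (((detachAux s [] 0 0).1.foldl isCorrectStep []).length = 0)
            ↔ (isCorrectA (detachA s).1 = true) := by
          unfold isCorrectA detachA
          simp [List.length_eq_zero_iff]
        by_cases hcnt : ((detachAux s [] 0 0).1.foldl isCorrectStep []).length = 0
        · rw [if_pos hcnt, if_pos (hcorr.mp hcnt)]
          rw [ih (detachAux s [] 0 0).2 hvlen]
          simp [detachA]
        · rw [if_neg hcnt, if_neg (fun hc => hcnt (hcorr.mpr hc))]
          rw [ih (detachAux s [] 0 0).2 hvlen]
          rw [slice_one_neg_one, flipB_eq_map]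
          simp [detachA]

-- ===== VERDICT (by name: the statement is the Claim_ definition above) =====
theorem recurse_spec : Claim_equal_recurse := by
  intro string _
  unfold Spec_recurse recurse recurse_alt
  rw [loopB_eq string.toList.length string.toList le_rfl]
  simp
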